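-- pv_equiv track=rewrite | github.com/Frederic-Barcelone/ese | gold_data/CADEC/evaluate_cadec_drugs.py | _are_brand_generic_equivalent
-- ===== SOURCE A (Python) =====
-- BRAND_GENERIC_EQUIVALENCES: dict[str, set[str]] = {
--     "acetaminophen": {"tylenol", "paracetamol", "panadol", "tylenol 3",
--                       "tylenol extra", "arthritis strength tylenol"},
--     "rofecoxib": {"vioxx"},
--     "valdecoxib": {"bextra"},
--     "celecoxib": {"celebrex"},
--     "etanercept": {"enbrel", "enbrel injections"},
--     "furosemide": {"lasix"},
--     "naproxen": {"aleve", "alleve", "naprosyn"},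
--     "simvastatin": {"zocor", "zocar", "zorcor"},
--     "atorvastatin": {"lipitor", "liptor", "lipitors"},
--     "pravastatin": {"pravachol", "pravochol"},
--     "lovastatin": {"mevacor", "mevacore"},
--     "rosuvastatin": {"crestor"},
--     "fluvastatin": {"lescol"},
--     "diclofenac": {"voltaren", "arthrotec", "artrotec", "cataflam", "solaraze",
--                    "zipsor", "pennsaid"},
--     "ibuprofen": {"advil", "motrin", "nurofen"},
--     "captopril": {"capoten", "capiten"},
--     "glipizide": {"glucotrol", "glcotrol"},
--     "pioglitazone": {"actos", "actose"},
--     "nabumetone": {"relafen", "relefen"},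
--     "ezetimibe": {"zetia", "ezetimbe"},
--     "trazodone": {"desyrel", "trazadone"},
--     "hydrocodone": {"vicodin", "hydrocodine"},
--     "capsaicin": {"capsacian", "zostrix"},
-- }
--
-- def _are_brand_generic_equivalent(name_a: str, name_b: str) -> bool:
--     """Check if two drug names are brand/generic equivalents."""
--     a = name_a.lower()
--     b = name_b.lower()
--
--     for generic, brands in BRAND_GENERIC_EQUIVALENCES.items():
--         all_names = brands | {generic}
--         if a in all_names and b in all_names:
--             return True
--     return False
-- ===== SOURCE B (Python) =====
-- # Equivalence table stored as compact CSV rows (one per group, generic name first),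
-- # parsed once at import into an inverted index name -> group id; each call is then
-- # two dict lookups instead of a scan over all groups.
-- _TABLE = [
--     "acetaminophen,tylenol,paracetamol,panadol,tylenol 3,tylenol extra,arthritis strength tylenol",
--     "rofecoxib,vioxx",
--     "valdecoxib,bextra",
--     "celecoxib,celebrex",
--     "etanercept,enbrel,enbrel injections",
--     "furosemide,lasix",
--     "naproxen,aleve,alleve,naprosyn",
--     "simvastatin,zocor,zocar,zorcor",
--     "atorvastatin,lipitor,liptor,lipitors",
--     "pravastatin,pravachol,pravochol",
--     "lovastatin,mevacor,mevacore",
--     "rosuvastatin,crestor",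
--     "fluvastatin,lescol",
--     "diclofenac,voltaren,arthrotec,artrotec,cataflam,solaraze,zipsor,pennsaid",
--     "ibuprofen,advil,motrin,nurofen",
--     "captopril,capoten,capiten",
--     "glipizide,glucotrol,glcotrol",
--     "pioglitazone,actos,actose",
--     "nabumetone,relafen,relefen",
--     "ezetimibe,zetia,ezetimbe",
--     "trazodone,desyrel,trazadone",
--     "hydrocodone,vicodin,hydrocodine",
--     "capsaicin,capsacian,zostrix",
-- ]
--
-- _NAME_TO_GROUP: dict[str, int] = {}
-- for _i, _row in enumerate(_TABLE):
--     for _name in _row.split(","):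
--         _NAME_TO_GROUP[_name] = _i
--
--
-- def _are_brand_generic_equivalent(name_a: str, name_b: str) -> bool:
--     """Check if two drug names are brand/generic equivalents."""
--     group = _NAME_TO_GROUP.get(name_a.lower())
--     return group is not None and group == _NAME_TO_GROUP.get(name_b.lower())
-- ===== Notes on version B (the rewrite author's own statement) =====
-- stated objective: faster
-- what changed: B stores the table as compact CSV text, parses it once at import into an inverted index mapping every name to its group id, and answers each call with two dict lookups and an id comparison instead of A's per-call loop that rebuilds a set union for every group.
import Mathlib
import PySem

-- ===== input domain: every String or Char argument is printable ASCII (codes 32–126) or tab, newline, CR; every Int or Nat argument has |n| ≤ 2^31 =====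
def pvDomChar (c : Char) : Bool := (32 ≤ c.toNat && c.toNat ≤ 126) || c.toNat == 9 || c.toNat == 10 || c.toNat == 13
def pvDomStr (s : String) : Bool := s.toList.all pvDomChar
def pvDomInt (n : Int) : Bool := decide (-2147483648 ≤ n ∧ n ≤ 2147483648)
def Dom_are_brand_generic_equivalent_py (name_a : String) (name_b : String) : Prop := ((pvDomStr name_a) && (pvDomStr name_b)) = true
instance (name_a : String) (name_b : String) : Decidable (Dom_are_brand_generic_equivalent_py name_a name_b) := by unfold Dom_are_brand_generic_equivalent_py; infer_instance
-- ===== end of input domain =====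

-- B stores the table as CSV rows, parses them once into an inverted index name → group id,
-- and answers each call with two lookups; objective: faster (constant-factor per call).

-- ===== PORT A =====
-- BRAND_GENERIC_EQUIVALENCES: dict[str, set[str]] as an association list of (generic, brand set)
def pvTable : List (String × PySem.Set String) := [
  ("acetaminophen", PySem.Set.ofList ["tylenol", "paracetamol", "panadol", "tylenol 3",
                      "tylenol extra", "arthritis strength tylenol"]),
  ("rofecoxib", PySem.Set.ofList ["vioxx"]),
  ("valdecoxib", PySem.Set.ofList ["bextra"]),
  ("celecoxib", PySem.Set.ofList ["celebrex"]),
  ("etanercept", PySem.Set.ofList ["enbrel", "enbrel injections"]),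
  ("furosemide", PySem.Set.ofList ["lasix"]),
  ("naproxen", PySem.Set.ofList ["aleve", "alleve", "naprosyn"]),
  ("simvastatin", PySem.Set.ofList ["zocor", "zocar", "zorcor"]),
  ("atorvastatin", PySem.Set.ofList ["lipitor", "liptor", "lipitors"]),
  ("pravastatin", PySem.Set.ofList ["pravachol", "pravochol"]),
  ("lovastatin", PySem.Set.ofList ["mevacor", "mevacore"]),
  ("rosuvastatin", PySem.Set.ofList ["crestor"]),
  ("fluvastatin", PySem.Set.ofList ["lescol"]),
  ("diclofenac", PySem.Set.ofList ["voltaren", "arthrotec", "artrotec", "cataflam", "solaraze",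
                   "zipsor", "pennsaid"]),
  ("ibuprofen", PySem.Set.ofList ["advil", "motrin", "nurofen"]),
  ("captopril", PySem.Set.ofList ["capoten", "capiten"]),
  ("glipizide", PySem.Set.ofList ["glucotrol", "glcotrol"]),
  ("pioglitazone", PySem.Set.ofList ["actos", "actose"]),
  ("nabumetone", PySem.Set.ofList ["relafen", "relefen"]),
  ("ezetimibe", PySem.Set.ofList ["zetia", "ezetimbe"]),
  ("trazodone", PySem.Set.ofList ["desyrel", "trazadone"]),
  ("hydrocodone", PySem.Set.ofList ["vicodin", "hydrocodine"]),
  ("capsaicin", PySem.Set.ofList ["capsacian", "zostrix"])]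

-- the 'for generic, brands in …: all_names = brands | {generic}; if a in all_names and b in all_names: return True' loop
def pvLoopA : List (String × PySem.Set String) → String → String → Bool
  | [], _, _ => false
  | (generic, brands) :: rest, a, b =>
      let all_names := PySem.Set.union brands (PySem.Set.ofList [generic])
      if PySem.Set.contains all_names a && PySem.Set.contains all_names b then true
      else pvLoopA rest a b

def are_brand_generic_equivalent_py (name_a : String) (name_b : String) : Bool :=
  let a := PySem.Str.lower name_a
  let b := PySem.Str.lower name_b
  pvLoopA pvTable a b

-- ===== PORT B =====
-- _TABLE: the CSV rows, one group per row, generic first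
def pvRows : List String := [
  "acetaminophen,tylenol,paracetamol,panadol,tylenol 3,tylenol extra,arthritis strength tylenol",
  "rofecoxib,vioxx",
  "valdecoxib,bextra",
  "celecoxib,celebrex",
  "etanercept,enbrel,enbrel injections",
  "furosemide,lasix",
  "naproxen,aleve,alleve,naprosyn",
  "simvastatin,zocor,zocar,zorcor",
  "atorvastatin,lipitor,liptor,lipitors",
  "pravastatin,pravachol,pravochol",
  "lovastatin,mevacor,mevacore",
  "rosuvastatin,crestor",
  "fluvastatin,lescol",
  "diclofenac,voltaren,arthrotec,artrotec,cataflam,solaraze,zipsor,pennsaid",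
  "ibuprofen,advil,motrin,nurofen",
  "captopril,capoten,capiten",
  "glipizide,glucotrol,glcotrol",
  "pioglitazone,actos,actose",
  "nabumetone,relafen,relefen",
  "ezetimibe,zetia,ezetimbe",
  "trazodone,desyrel,trazadone",
  "hydrocodone,vicodin,hydrocodine",
  "capsaicin,capsacian,zostrix"]

-- line.split(",") — the separator is the nonempty literal ",", so Python never raises; split? is some here
def pvSplitComma (line : String) : List String := (PySem.Str.split? line ",").getD []

-- _NAME_TO_GROUP: for _i, _row in enumerate(_TABLE): for _name in _row.split(","): index[_name] = _i
def pvIndexB : PySem.Dict String Int :=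
  (PySem.List.enumerate pvRows).foldl
    (fun d p => (pvSplitComma p.2).foldl (fun d name => d.insert name p.1) d)
    PySem.Dict.empty

def are_brand_generic_equivalent_py_alt (name_a : String) (name_b : String) : Bool :=
  match pvIndexB.get? (PySem.Str.lower name_a) with
  | none => false
  | some group => pvIndexB.get? (PySem.Str.lower name_b) == some group

-- ===== PRECONDITION & SPEC =====
def Spec_are_brand_generic_equivalent_py (name_a : String) (name_b : String) (out : Bool) : Prop := out = are_brand_generic_equivalent_py_alt name_a name_b
instance (name_a : String) (name_b : String) (out : Bool) : Decidable (Spec_are_brand_generic_equivalent_py name_a name_b out) := by unfold Spec_are_brand_generic_equivalent_py; infer_instance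

-- ===== CLAIM (what is proved, stated in full; the proofs are below) =====
def Claim_equal_are_brand_generic_equivalent_py : Prop := ∀ (name_a : String) (name_b : String), Dom_are_brand_generic_equivalent_py name_a name_b → Spec_are_brand_generic_equivalent_py name_a name_b (are_brand_generic_equivalent_py name_a name_b)

-- ===== LEMMAS AND PROOFS =====

-- all names of one group of A's table: the generic followed by its brands
def pvNamesOf (p : String × PySem.Set String) : List String := p.1 :: p.2

-- the generic of the first group whose names contain x (what A's scan finds)
def pvFirstGroup : List (String × PySem.Set String) → String → Option String
  | [], _ => none
  | p :: rest, x => if x ∈ pvNamesOf p then some p.1 else pvFirstGroup rest x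

-- the id (starting at i) of the first name-group containing x (what B's index stores)
def pvFirstIdx : List (List String) → Int → String → Option Int
  | [], _, _ => none
  | g :: rest, i, x => if x ∈ g then some i else pvFirstIdx rest (i + 1) x

theorem pvFirstGroup_eq_none_iff (tbl : List (String × PySem.Set String)) (x : String) :
    pvFirstGroup tbl x = none ↔ x ∉ tbl.flatMap pvNamesOf := by
  induction tbl with
  | nil => simp [pvFirstGroup]
  | cons p rest ih =>
      simp only [pvFirstGroup, List.flatMap_cons, List.mem_append]
      split_ifs with h <;> simp [h, ih]

theorem pvFirstGroup_sound (tbl : List (String × PySem.Set String)) (x g : String)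
    (h : pvFirstGroup tbl x = some g) : ∃ p ∈ tbl, p.1 = g ∧ x ∈ pvNamesOf p := by
  induction tbl with
  | nil => simp [pvFirstGroup] at h
  | cons p rest ih =>
      simp only [pvFirstGroup] at h
      split_ifs at h with hm
      · exact ⟨p, List.mem_cons_self, by injection h, hm⟩
      · obtain ⟨q, hq, hg, hx⟩ := ih h
        exact ⟨q, List.mem_cons_of_mem _ hq, hg, hx⟩

-- the generic g of any group of tbl occurs among tbl's names
theorem pvGeneric_mem_flatMap (tbl : List (String × PySem.Set String)) (p : String × PySem.Set String)
    (hp : p ∈ tbl) : p.1 ∈ tbl.flatMap pvNamesOf :=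
  List.mem_flatMap.mpr ⟨p, hp, List.mem_cons_self⟩

theorem pvFirstIdx_eq_none_iff (gs : List (List String)) (i : Int) (x : String) :
    pvFirstIdx gs i x = none ↔ x ∉ gs.flatten := by
  induction gs generalizing i with
  | nil => simp [pvFirstIdx]
  | cons g rest ih =>
      simp only [pvFirstIdx, List.flatten_cons, List.mem_append]
      split_ifs with h <;> simp [h, ih]

theorem pvFirstIdx_le (gs : List (List String)) (i j : Int) (x : String)
    (h : pvFirstIdx gs i x = some j) : i ≤ j := by
  induction gs generalizing i with
  | nil => simp [pvFirstIdx] at h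
  | cons g rest ih =>
      simp only [pvFirstIdx] at h
      split_ifs at h with hm
      · injection h with h; omega
      · have := ih (i + 1) h; omega

-- lookup after inserting all names of one group with id i
theorem pvGet_foldl_insert (names : List String) (d : PySem.Dict String Int) (i : Int) (x : String) :
    (names.foldl (fun d name => d.insert name i) d).get? x
      = if x ∈ names then some i else d.get? x := by
  induction names generalizing d with
  | nil => simp
  | cons h t ih =>
      simp only [List.foldl_cons, ih, PySem.Dict.get?_insert, List.mem_cons]
      by_cases hx : x ∈ t <;> by_cases hh : x = h <;> simp [hx, hh]

-- the whole index-building fold answers the first group's id (all names distinct across groups)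
theorem pvGet_foldl_enum (gs : List (List String)) (i : Int) (d : PySem.Dict String Int)
    (x : String) (hnd : gs.flatten.Nodup) :
    ((PySem.List.enumerate gs i).foldl
        (fun d p => p.2.foldl (fun d name => d.insert name p.1) d) d).get? x
      = match pvFirstIdx gs i x with
        | some j => some j
        | none => d.get? x := by
  induction gs generalizing i d with
  | nil => simp [PySem.List.enumerate, pvFirstIdx]
  | cons g rest ih =>
      simp only [List.flatten_cons, List.nodup_append] at hnd
      obtain ⟨-, hndr, hdisj⟩ := hnd
      rw [PySem.List.enumerate_cons]
      simp only [List.foldl_cons, ih (i + 1) _ hndr, pvFirstIdx]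
      by_cases hm : x ∈ g
      · have hnone : pvFirstIdx rest (i + 1) x = none :=
          (pvFirstIdx_eq_none_iff rest (i + 1) x).mpr (fun hc => hdisj x hm x hc rfl)
        simp [hm, hnone, pvGet_foldl_insert]
      · cases hfg : pvFirstIdx rest (i + 1) x <;> simp [hm, pvGet_foldl_insert]

-- B's parsed groups are exactly the name lists of A's table (a concrete computation)
theorem pvGroups_eq :
    pvRows.map pvSplitComma = pvTable.map pvNamesOf := by decide

-- all names in the table are pairwise distinct
theorem pvTable_nodup : (pvTable.flatMap pvNamesOf).Nodup := by decide

-- rewrite A's membership tests in the union set as membership in pvNamesOf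
theorem pvContains_all_names (brands : PySem.Set String) (generic x : String) :
    PySem.Set.contains (PySem.Set.union brands (PySem.Set.ofList [generic])) x
      = decide (x ∈ pvNamesOf (generic, brands)) := by
  have h : x ∈ PySem.Set.union brands (PySem.Set.ofList [generic])
      ↔ x ∈ pvNamesOf (generic, brands) := by
    rw [PySem.Set.mem_union, PySem.Set.mem_ofList]
    simp [pvNamesOf, or_comm]
  simp [PySem.Set.contains, List.contains_eq_mem, h]

-- A's scan, characterised by pvFirstGroup (under all-names-distinct)
theorem pvLoopA_eq (tbl : List (String × PySem.Set String)) (a b : String)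
    (hnd : (tbl.flatMap pvNamesOf).Nodup) :
    pvLoopA tbl a b
      = match pvFirstGroup tbl a with
        | none => false
        | some g => pvFirstGroup tbl b == some g := by
  induction tbl with
  | nil => rfl
  | cons p rest ih =>
      obtain ⟨generic, brands⟩ := p
      simp only [List.flatMap_cons, List.nodup_append] at hnd
      obtain ⟨-, hndr, hdisj⟩ := hnd
      have hdisj' : ∀ y, y ∈ pvNamesOf (generic, brands) → y ∉ rest.flatMap pvNamesOf :=
        fun y hy hc => hdisj y hy y hc rfl
      simp only [pvLoopA, pvContains_all_names, pvFirstGroup, ih hndr]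
      by_cases ha : a ∈ pvNamesOf (generic, brands) <;>
        by_cases hb : b ∈ pvNamesOf (generic, brands)
      · simp [ha, hb]
      · have hna : pvFirstGroup rest a = none :=
          (pvFirstGroup_eq_none_iff rest a).mpr (hdisj' a ha)
        have hbne : ∀ g, pvFirstGroup rest b = some g → g ≠ (generic, brands).1 := by
          intro g hg hgq
          obtain ⟨q, hq, hq1, -⟩ := pvFirstGroup_sound rest b g hg
          exact hdisj' g (hgq ▸ List.mem_cons_self) (hq1 ▸ pvGeneric_mem_flatMap rest q hq)
        cases hfb : pvFirstGroup rest b with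
        | none => simp [ha, hb, hna]
        | some g => simp [ha, hb, hna, hbne g hfb]
      · have hnb : pvFirstGroup rest b = none :=
          (pvFirstGroup_eq_none_iff rest b).mpr (hdisj' b hb)
        have hane : ∀ g, pvFirstGroup rest a = some g → (generic, brands).1 ≠ g := by
          intro g hg hgq
          obtain ⟨q, hq, hq1, -⟩ := pvFirstGroup_sound rest a g hg
          exact hdisj' g (hgq ▸ List.mem_cons_self) (hq1 ▸ pvGeneric_mem_flatMap rest q hq)
        cases hfa : pvFirstGroup rest a with
        | none => simp [ha, hb]
        | some g => simp [ha, hb, hnb, hane g hfa]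
      · cases hfa : pvFirstGroup rest a <;> simp [ha, hb]

-- splitting each row first, then folding, builds the same dict
theorem pvFold_map (ls : List String) (i : Int) (d : PySem.Dict String Int) :
    (PySem.List.enumerate ls i).foldl
        (fun d p => (pvSplitComma p.2).foldl (fun d name => d.insert name p.1) d) d
      = (PySem.List.enumerate (ls.map pvSplitComma) i).foldl
        (fun d p => p.2.foldl (fun d name => d.insert name p.1) d) d := by
  induction ls generalizing i d with
  | nil => rfl
  | cons l rest ih => simp [PySem.List.enumerate_cons, ih]

-- B's index answers the id of the first group containing x
theorem pvGet_pvIndexB (x : String) :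
    pvIndexB.get? x = pvFirstIdx (pvTable.map pvNamesOf) 0 x := by
  have hnd : (pvRows.map pvSplitComma).flatten.Nodup := by
    rw [pvGroups_eq, ← List.flatMap_def]; exact pvTable_nodup
  have h := pvGet_foldl_enum (pvRows.map pvSplitComma) 0
      PySem.Dict.empty x hnd
  rw [pvIndexB, pvFold_map pvRows 0 PySem.Dict.empty, h, pvGroups_eq]
  cases pvFirstIdx (pvTable.map pvNamesOf) 0 x <;> simp

-- comparing first-group ids agrees with comparing first-group generics (under all-names-distinct)
theorem pvBridge (tbl : List (String × PySem.Set String)) (i : Int) (a b : String)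
    (hnd : (tbl.flatMap pvNamesOf).Nodup) :
    (match pvFirstIdx (tbl.map pvNamesOf) i a with
      | none => false
      | some ga => pvFirstIdx (tbl.map pvNamesOf) i b == some ga)
    = (match pvFirstGroup tbl a with
      | none => false
      | some g => pvFirstGroup tbl b == some g) := by
  induction tbl generalizing i with
  | nil => rfl
  | cons p rest ih =>
      simp only [List.flatMap_cons, List.nodup_append] at hnd
      obtain ⟨-, hndr, hdisj⟩ := hnd
      have hdisj' : ∀ y, y ∈ pvNamesOf p → y ∉ rest.flatMap pvNamesOf :=
        fun y hy hc => hdisj y hy y hc rfl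
      simp only [List.map_cons, pvFirstIdx, pvFirstGroup]
      by_cases ha : a ∈ pvNamesOf p <;> by_cases hb : b ∈ pvNamesOf p
      · simp [ha, hb]
      · have hbne : ∀ g, pvFirstGroup rest b = some g → g ≠ p.1 := by
          intro g hg hgq
          obtain ⟨q, hq, hq1, -⟩ := pvFirstGroup_sound rest b g hg
          exact hdisj' g (hgq ▸ List.mem_cons_self) (hq1 ▸ pvGeneric_mem_flatMap rest q hq)
        have hjne : ∀ j, pvFirstIdx (rest.map pvNamesOf) (i + 1) b = some j → j ≠ i := by
          intro j hj; have := pvFirstIdx_le _ _ _ _ hj; omega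
        cases hfb : pvFirstIdx (rest.map pvNamesOf) (i + 1) b with
        | none =>
            cases hgb : pvFirstGroup rest b with
            | none => simp [ha, hb]
            | some g => simp [ha, hb, hbne g hgb]
        | some j =>
            cases hgb : pvFirstGroup rest b with
            | none => simp [ha, hb, hjne j hfb]
            | some g => simp [ha, hb, hjne j hfb, hbne g hgb]
      · have hane : ∀ g, pvFirstGroup rest a = some g → p.1 ≠ g := by
          intro g hg hgq
          obtain ⟨q, hq, hq1, -⟩ := pvFirstGroup_sound rest a g hg
          exact hdisj' g (hgq ▸ List.mem_cons_self) (hq1 ▸ pvGeneric_mem_flatMap rest q hq)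
        have hjne : ∀ j, pvFirstIdx (rest.map pvNamesOf) (i + 1) a = some j → i ≠ j := by
          intro j hj; have := pvFirstIdx_le _ _ _ _ hj; omega
        cases hfa : pvFirstIdx (rest.map pvNamesOf) (i + 1) a with
        | none =>
            cases hga : pvFirstGroup rest a with
            | none => simp [ha]
            | some g => simp [ha, hb, hane g hga]
        | some j =>
            cases hga : pvFirstGroup rest a with
            | none => simp [ha, hb, hjne j hfa]
            | some g => simp [ha, hb, hjne j hfa, hane g hga]
      · simpa [ha, hb] using ih (i + 1) hndr

-- ===== VERDICT (by name: the statement is the Claim_ definition above) =====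
theorem are_brand_generic_equivalent_py_spec : Claim_equal_are_brand_generic_equivalent_py := by
  intro name_a name_b _
  unfold Spec_are_brand_generic_equivalent_py
  unfold are_brand_generic_equivalent_py are_brand_generic_equivalent_py_alt
  rw [pvLoopA_eq pvTable _ _ pvTable_nodup, pvGet_pvIndexB, pvGet_pvIndexB,
    pvBridge pvTable 0 _ _ pvTable_nodup]
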